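-- pv_equiv track=rewrite | github.com/kanishka1305/DAA | pro 16.py | is_hamiltonian_cycle
-- ===== SOURCE A (Python) =====
-- def is_hamiltonian_cycle(edges, n):
--     # Create an adjacency list from the edges
--     from collections import defaultdict
--
--     graph = defaultdict(list)
--     for u, v in edges:
--         graph[u].append(v)
--         graph[v].append(u)
--
--     # Helper function to perform backtracking
--     def backtrack(path):
--         if len(path) == n:
--             # Check if the last vertex connects to the first
--             return path[0] in graph[path[-1]]
--
--         for neighbor in graph[path[-1]]:
--             if neighbor not in path:
--                 path.append(neighbor)
--                 if backtrack(path):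
--                     return True
--                 path.pop()
--         return False
--
--     # Start the path with the first vertex
--     for start in range(n):
--         if backtrack([start]):
--             return True
--     return False
-- ===== SOURCE B (Python) =====
-- # B: Held-Karp style level DP over (visited-set, last) states instead of path
-- # backtracking; an alternative exact algorithm (dedups paths sharing a visited set).
-- def is_hamiltonian_cycle(edges, n):
--     if n <= 0:
--         return False
--     adj = {}
--     for u, v in edges:
--         adj.setdefault(u, []).append(v)
--         adj.setdefault(v, []).append(u)
--     if n == 1:
--         return 0 in adj.get(0, [])
--     for s in adj:
--         if not (0 <= s < n):
--             continue
--         states = {((s,), s)}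
--         for _ in range(n - 1):
--             nxt = set()
--             for vis, last in states:
--                 for w in adj[last]:
--                     if w not in vis:
--                         nxt.add((tuple(sorted(vis + (w,))), w))
--             states = nxt
--         if any(s in adj[last] for _, last in states):
--             return True
--     return False
-- ===== Notes on version B (the rewrite author's own statement) =====
-- stated objective: alternative
-- what changed: Replaces A's backtracking over individual paths by a Held-Karp style level-by-level dynamic programming over (visited-set, last-vertex) states, which merges all partial paths sharing a visited set and iterates only over start vertices that actually occur as edge endpoints instead of all of range(n); it trades per-path recursion for per-level state sets of the same worst-case cost on dense graphs.
import Mathlib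
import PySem

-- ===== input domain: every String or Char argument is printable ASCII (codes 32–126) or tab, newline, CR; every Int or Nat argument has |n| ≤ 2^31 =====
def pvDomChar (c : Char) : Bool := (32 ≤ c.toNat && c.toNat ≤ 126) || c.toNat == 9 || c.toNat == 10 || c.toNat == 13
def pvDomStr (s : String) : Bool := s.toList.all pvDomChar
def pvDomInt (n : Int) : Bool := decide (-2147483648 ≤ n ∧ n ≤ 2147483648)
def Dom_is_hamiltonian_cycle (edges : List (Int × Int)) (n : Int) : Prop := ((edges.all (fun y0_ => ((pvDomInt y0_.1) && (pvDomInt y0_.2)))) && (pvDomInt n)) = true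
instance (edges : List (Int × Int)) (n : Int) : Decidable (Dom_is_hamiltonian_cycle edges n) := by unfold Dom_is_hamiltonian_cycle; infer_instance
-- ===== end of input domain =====

-- B replaces A's path backtracking with a Held-Karp style level DP over
-- (visited-set, last-vertex) states; objective: alternative algorithm, same worst-case cost.


-- ===== PORT A =====
-- adjacency list from the edges (defaultdict(list): append v to graph[u] and u to graph[v]);
-- the defaultdict's silent creation of EMPTY entries on lookup never changes any lookup's
-- result, so lookups are ported as getD with default [].
def pvAdjA (edges : List (Int × Int)) : PySem.Dict Int (List Int) :=
  edges.foldl (fun g e =>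
    let g1 := g.insert e.1 (g.getD e.1 [] ++ [e.2])
    g1.insert e.2 (g1.getD e.2 [] ++ [e.1])) PySem.Dict.empty

-- backtrack(path): path is never empty (so path[0]/path[-1] are headD/getLastD); the
-- recursion depth in Python is at most n - len(path) + 1, so fuel n.toNat is enough.
def pvBacktrack (g : PySem.Dict Int (List Int)) (n : Int) : Nat → List Int → Bool
  | 0, _ => false
  | fuel+1, path =>
    if (path.length : Int) = n then
      (g.getD (path.getLastD 0) []).contains (path.headD 0)
    else
      (g.getD (path.getLastD 0) []).any (fun nb =>
        !path.contains nb && pvBacktrack g n fuel (path ++ [nb]))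

def is_hamiltonian_cycle (edges : List (Int × Int)) (n : Int) : Bool :=
  (PySem.List.pyRange 0 n).any (fun s => pvBacktrack (pvAdjA edges) n n.toNat [s])

-- ===== PORT B =====
-- same adjacency dict, built with setdefault(...,[]).append(...)
def pvAdjB (edges : List (Int × Int)) : PySem.Dict Int (List Int) :=
  edges.foldl (fun g e =>
    let g1 := g.insert e.1 (g.getD e.1 [] ++ [e.2])
    g1.insert e.2 (g1.getD e.2 [] ++ [e.1])) PySem.Dict.empty

-- one DP level: from every state (vis, last) and every unvisited neighbour w of last,
-- add the state (sorted(vis + (w,)), w) to the next level's set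
def pvStep (g : PySem.Dict Int (List Int)) (states : PySem.Set (List Int × Int)) :
    PySem.Set (List Int × Int) :=
  states.foldl (fun nxt st =>
    (g.getD st.2 []).foldl (fun nxt w =>
      if st.1.contains w then nxt
      else PySem.Set.add nxt (PySem.List.sorted (st.1 ++ [w]) (fun x => x) false, w)) nxt)
    PySem.Set.empty

-- 'for _ in range(k): states = step(states)'
def pvLoop (g : PySem.Dict Int (List Int)) : Nat → PySem.Set (List Int × Int) → PySem.Set (List Int × Int)
  | 0, states => states
  | k+1, states => pvLoop g k (pvStep g states)

def is_hamiltonian_cycle_alt (edges : List (Int × Int)) (n : Int) : Bool :=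
  if n ≤ 0 then false
  else
    let g := pvAdjB edges
    if n = 1 then (g.getD 0 []).contains 0
    else
      g.keys.any (fun s =>
        if 0 ≤ s ∧ s < n then
          (pvLoop g (n-1).toNat (PySem.Set.ofList [([s], s)])).any
            (fun st => (g.getD st.2 []).contains s)
        else false)

-- ===== PRECONDITION & SPEC =====
def Spec_is_hamiltonian_cycle (edges : List (Int × Int)) (n : Int) (out : Bool) : Prop := out = is_hamiltonian_cycle_alt edges n
instance (edges : List (Int × Int)) (n : Int) (out : Bool) : Decidable (Spec_is_hamiltonian_cycle edges n out) := by unfold Spec_is_hamiltonian_cycle; infer_instance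

-- ===== CLAIM (what is proved, stated in full; the proofs are below) =====
def Claim_equal_is_hamiltonian_cycle : Prop := ∀ (edges : List (Int × Int)) (n : Int), Dom_is_hamiltonian_cycle edges n → Spec_is_hamiltonian_cycle edges n (is_hamiltonian_cycle edges n)

-- ===== LEMMAS AND PROOFS =====

-- the edge relation of the (shared) adjacency dict
def pvE (g : PySem.Dict Int (List Int)) (a b : Int) : Prop := b ∈ g.getD a []

-- "there is a Hamiltonian-style cycle of n vertices starting at s": a nodup chain
-- s :: ext of length n whose last vertex is adjacent back to s
def pvHamFrom (g : PySem.Dict Int (List Int)) (n : Int) (s : Int) : Prop :=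
  ∃ ext : List Int, (((s :: ext).length : Int) = n ∧ (s :: ext).Nodup ∧
    List.IsChain (pvE g) (s :: ext)) ∧ s ∈ g.getD ((s :: ext).getLastD 0) []

theorem pvAdjB_eq (edges : List (Int × Int)) : pvAdjB edges = pvAdjA edges := rfl

-- characterisation of A's backtrack
theorem pvHeadD_append (p l : List Int) (h : p ≠ []) : (p ++ l).headD 0 = p.headD 0 := by
  cases p with
  | nil => simp at h
  | cons a t => simp

theorem pvGetLast?_eq (p : List Int) (h : p ≠ []) : p.getLast? = some (p.getLastD 0) := by
  induction p with
  | nil => simp at h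
  | cons a t ih =>
    cases t with
    | nil => simp
    | cons b u => simpa using ih (by simp)

theorem pvNodupConcat (p : List Int) (nb : Int) (hnd : p.Nodup) (hnotin : nb ∉ p) :
    (p ++ [nb]).Nodup := by
  rw [List.nodup_append]
  refine ⟨hnd, List.nodup_singleton _, fun a ha b hb => ?_⟩
  simp only [List.mem_singleton] at hb
  subst hb
  exact fun h => hnotin (h ▸ ha)

theorem pvBacktrack_iff (g : PySem.Dict Int (List Int)) (n : Int) :
    ∀ (fuel : Nat) (path : List Int), path ≠ [] → path.Nodup →
    List.IsChain (pvE g) path →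
    path.length ≤ n.toNat → n.toNat < fuel + path.length →
    (pvBacktrack g n fuel path = true ↔
      ∃ ext : List Int, (((path ++ ext).length : Int) = n ∧ (path ++ ext).Nodup ∧
        List.IsChain (pvE g) (path ++ ext)) ∧
        path.headD 0 ∈ g.getD ((path ++ ext).getLastD 0) []) := by
  intro fuel
  induction fuel with
  | zero =>
    intro path hne hnd hch hlen hfuel
    exact absurd hfuel (by omega)
  | succ fuel ih =>
    intro path hne hnd hch hlen hfuel
    have hpos : 0 < path.length := List.length_pos_of_ne_nil hne
    simp only [pvBacktrack]
    by_cases hl : (path.length : Int) = n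
    · rw [if_pos hl]
      constructor
      · intro h
        refine ⟨[], ⟨by simpa using hl, by simpa using hnd, by simpa using hch⟩, ?_⟩
        simpa [List.contains_iff_mem] using h
      · rintro ⟨ext, ⟨hlen', _, _⟩, hmem'⟩
        have hext : ext = [] := by
          rw [List.length_append] at hlen'
          push_cast at hlen'
          exact List.eq_nil_of_length_eq_zero (by omega)
        subst hext
        simpa [List.contains_iff_mem] using hmem'
    · rw [if_neg hl]
      have hpl : path.length < n.toNat := by omega
      constructor
      · intro h
        rw [List.any_eq_true] at h
        obtain ⟨nb, hnbmem, hcond⟩ := h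
        rw [Bool.and_eq_true, Bool.not_eq_true', ← Bool.not_eq_true, List.contains_iff_mem] at hcond
        obtain ⟨hnotin, hbt⟩ := hcond
        have hch2 : List.IsChain (pvE g) (path ++ [nb]) := by
          rw [List.isChain_append]
          refine ⟨hch, by simp, ?_⟩
          intro x hx y hy
          rw [pvGetLast?_eq path hne, Option.mem_some_iff] at hx
          rw [List.head?_cons, Option.mem_some_iff] at hy
          subst hx; subst hy
          exact hnbmem
        have := (ih (path ++ [nb]) (by simp) (pvNodupConcat path nb hnd hnotin)
          hch2 (by simp; omega) (by simp; omega)).mp hbt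
        obtain ⟨ext', ⟨hlen', hnd', hch'⟩, hmem'⟩ := this
        refine ⟨nb :: ext', ?_⟩
        rw [pvHeadD_append path [nb] hne] at hmem'
        rw [show path ++ nb :: ext' = (path ++ [nb]) ++ ext' by simp]
        exact ⟨⟨hlen', hnd', hch'⟩, hmem'⟩
      · rintro ⟨ext, ⟨hlen', hnd', hch'⟩, hmem'⟩
        cases ext with
        | nil =>
          exfalso
          rw [List.append_nil] at hlen'
          omega
        | cons nb ext' =>
          rw [List.any_eq_true]
          refine ⟨nb, ?_, ?_⟩
          · have := (List.isChain_append.mp hch').2.2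
            exact this (path.getLastD 0) (by rw [pvGetLast?_eq path hne]; rfl) nb (by simp)
          · have hnotin : nb ∉ path := by
              rw [List.nodup_append] at hnd'
              exact fun hmem => hnd'.2.2 nb hmem nb (by simp) rfl
            rw [Bool.and_eq_true, Bool.not_eq_true', ← Bool.not_eq_true, List.contains_iff_mem]
            refine ⟨hnotin, ?_⟩
            have hch2 : List.IsChain (pvE g) (path ++ [nb]) := by
              rw [List.isChain_append]
              refine ⟨hch, by simp, ?_⟩
              intro x hx y hy
              rw [pvGetLast?_eq path hne, Option.mem_some_iff] at hx
              rw [List.head?_cons, Option.mem_some_iff] at hy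
              subst hx; subst hy
              have := (List.isChain_append.mp hch').2.2
              exact this (path.getLastD 0) (by rw [pvGetLast?_eq path hne]; rfl) nb (by simp)
            refine (ih (path ++ [nb]) (by simp) (pvNodupConcat path nb hnd hnotin)
              hch2 (by simp; omega) (by simp; omega)).mpr ?_
            refine ⟨ext', ?_⟩
            rw [pvHeadD_append path [nb] hne]
            rw [show (path ++ [nb]) ++ ext' = path ++ nb :: ext' by simp]
            exact ⟨⟨hlen', hnd', hch'⟩, hmem'⟩

-- membership in one DP level step
theorem pvStep_mem (g : PySem.Dict Int (List Int)) (states : PySem.Set (List Int × Int))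
    (st : List Int × Int) :
    st ∈ pvStep g states ↔
      ∃ q ∈ states, ∃ w : Int, w ∈ g.getD q.2 [] ∧ w ∉ q.1 ∧
        st = (PySem.List.sorted (q.1 ++ [w]) (fun x => x) false, w) := by
  have inner : ∀ (vis : List Int) (last : Int) (ns : List Int) (acc : PySem.Set (List Int × Int)),
      (st ∈ ns.foldl (fun nxt w => if vis.contains w then nxt
        else PySem.Set.add nxt (PySem.List.sorted (vis ++ [w]) (fun x => x) false, w)) acc ↔
      st ∈ acc ∨ ∃ w ∈ ns, w ∉ vis ∧ st = (PySem.List.sorted (vis ++ [w]) (fun x => x) false, w)) := by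
    intro vis last ns
    induction ns with
    | nil => simp
    | cons w ws ih =>
      intro acc
      simp only [List.foldl_cons]
      rw [ih]
      by_cases hw : w ∈ vis
      · rw [if_pos (List.contains_iff_mem.mpr hw)]
        constructor
        · rintro (h | ⟨u, hu, hnu, rfl⟩)
          · exact Or.inl h
          · exact Or.inr ⟨u, List.mem_cons_of_mem _ hu, hnu, rfl⟩
        · rintro (h | ⟨u, hu, hnu, rfl⟩)
          · exact Or.inl h
          · rcases List.mem_cons.mp hu with rfl | hu
            · exact absurd hw hnu
            · exact Or.inr ⟨u, hu, hnu, rfl⟩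
      · rw [if_neg (fun hc => hw (List.contains_iff_mem.mp hc))]
        rw [PySem.Set.mem_add]
        constructor
        · rintro ((h | rfl) | ⟨u, hu, hnu, rfl⟩)
          · exact Or.inl h
          · exact Or.inr ⟨w, List.mem_cons_self, hw, rfl⟩
          · exact Or.inr ⟨u, List.mem_cons_of_mem _ hu, hnu, rfl⟩
        · rintro (h | ⟨u, hu, hnu, rfl⟩)
          · exact Or.inl (Or.inl h)
          · rcases List.mem_cons.mp hu with rfl | hu
            · exact Or.inl (Or.inr rfl)
            · exact Or.inr ⟨u, hu, hnu, rfl⟩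
  have outer : ∀ (sts : List (List Int × Int)) (acc : PySem.Set (List Int × Int)),
      (st ∈ sts.foldl (fun nxt q => (g.getD q.2 []).foldl (fun nxt w => if q.1.contains w then nxt
        else PySem.Set.add nxt (PySem.List.sorted (q.1 ++ [w]) (fun x => x) false, w)) nxt) acc ↔
      st ∈ acc ∨ ∃ q ∈ sts, ∃ w : Int, w ∈ g.getD q.2 [] ∧ w ∉ q.1 ∧
        st = (PySem.List.sorted (q.1 ++ [w]) (fun x => x) false, w)) := by
    intro sts
    induction sts with
    | nil => simp
    | cons q qs ih =>
      intro acc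
      simp only [List.foldl_cons]
      rw [ih, inner q.1 q.2]
      constructor
      · rintro ((h | ⟨w, hw, hnw, rfl⟩) | ⟨q', hq', w, hw, hnw, rfl⟩)
        · exact Or.inl h
        · exact Or.inr ⟨q, List.mem_cons_self, w, hw, hnw, rfl⟩
        · exact Or.inr ⟨q', List.mem_cons_of_mem _ hq', w, hw, hnw, rfl⟩
      · rintro (h | ⟨q', hq', w, hw, hnw, rfl⟩)
        · exact Or.inl (Or.inl h)
        · rcases List.mem_cons.mp hq' with rfl | hq'
          · exact Or.inl (Or.inr ⟨w, hw, hnw, rfl⟩)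
          · exact Or.inr ⟨q', hq', w, hw, hnw, rfl⟩
  simpa [pvStep] using outer states PySem.Set.empty

theorem pvLoop_step_comm (g : PySem.Dict Int (List Int)) (k : Nat) :
    ∀ states, pvLoop g k (pvStep g states) = pvStep g (pvLoop g k states) := by
  induction k with
  | zero => intro states; rfl
  | succ k ih =>
    intro states
    simp only [pvLoop]
    rw [ih]

-- loop invariant: the k-th level holds exactly the states of the nodup chains from s of length k+1
theorem pvLoop_mem (g : PySem.Dict Int (List Int)) (s : Int) (k : Nat) (st : List Int × Int) :
    st ∈ pvLoop g k (PySem.Set.ofList [([s], s)]) ↔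
      ∃ ext : List Int, (s :: ext).Nodup ∧ List.IsChain (pvE g) (s :: ext) ∧ ext.length = k ∧
        st = (PySem.List.sorted (s :: ext) (fun x => x) false, (s :: ext).getLastD 0) := by
  induction k generalizing st with
  | zero =>
    rw [pvLoop, PySem.Set.mem_ofList]
    constructor
    · intro h
      simp only [List.mem_singleton] at h
      exact ⟨[], by simp, by simp, rfl, h⟩
    · rintro ⟨ext, -, -, hlen, rfl⟩
      have : ext = [] := List.eq_nil_of_length_eq_zero hlen
      subst this
      simp only [List.mem_singleton, Prod.mk.injEq]
      exact ⟨rfl, rfl⟩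
  | succ k ih =>
    rw [pvLoop, pvLoop_step_comm, pvStep_mem]
    constructor
    · rintro ⟨q, hq, w, hw, hnw, rfl⟩
      obtain ⟨ext, hnd, hch, hlen, rfl⟩ := (ih q).mp hq
      simp only at hw hnw ⊢
      have hperm : (PySem.List.sorted (s :: ext) (fun x => x) false).Perm (s :: ext) :=
        PySem.List.sorted_perm _ _ _
      have hwn : w ∉ s :: ext := fun hm => hnw (hperm.mem_iff.mpr hm)
      have hh : s :: (ext ++ [w]) = (s :: ext) ++ [w] := by simp
      have h1 : PySem.List.sorted ((PySem.List.sorted (s :: ext) (fun x => x) false) ++ [w])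
          (fun x => x) false = PySem.List.sorted (s :: (ext ++ [w])) (fun x => x) false := by
        apply (PySem.List.sorted_id_eq_sorted_id_iff_perm _ _).mpr
        have := (List.perm_append_right_iff [w]).mpr hperm
        simpa using this
      have h2 : (s :: (ext ++ [w])).getLastD 0 = w := by rw [hh, List.getLastD_concat]
      refine ⟨ext ++ [w], ?_, ?_, by simpa using hlen, ?_⟩
      · have := pvNodupConcat (s :: ext) w hnd hwn
        simpa using this
      · rw [hh, List.isChain_append]
        refine ⟨hch, by simp, ?_⟩
        intro x hx y hy
        rw [pvGetLast?_eq (s :: ext) (by simp), Option.mem_some_iff] at hx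
        rw [List.head?_cons, Option.mem_some_iff] at hy
        subst hx; subst hy
        exact hw
      · rw [Prod.mk.injEq]
        exact ⟨h1, h2.symm⟩
    · rintro ⟨ext1, hnd, hch, hlen, rfl⟩
      rcases List.eq_nil_or_concat' ext1 with rfl | ⟨ext, w, rfl⟩
      · simp at hlen
      · have hh : s :: (ext ++ [w]) = (s :: ext) ++ [w] := by simp
        have hndp : (s :: ext).Nodup := by
          rw [hh, List.nodup_append] at hnd
          exact hnd.1
        have hwn : w ∉ s :: ext := by
          intro hm
          rw [hh, List.nodup_append] at hnd
          exact hnd.2.2 w hm w (by simp) rfl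
        have hchp : List.IsChain (pvE g) (s :: ext) := by
          rw [hh, List.isChain_append] at hch
          exact hch.1
        have hlast : pvE g ((s :: ext).getLastD 0) w := by
          rw [hh, List.isChain_append] at hch
          exact hch.2.2 _ (by rw [pvGetLast?_eq (s :: ext) (by simp)]; rfl) w (by simp)
        have hperm : (PySem.List.sorted (s :: ext) (fun x => x) false).Perm (s :: ext) :=
          PySem.List.sorted_perm _ _ _
        have h1 : PySem.List.sorted ((PySem.List.sorted (s :: ext) (fun x => x) false) ++ [w])
            (fun x => x) false = PySem.List.sorted (s :: (ext ++ [w])) (fun x => x) false := by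
          apply (PySem.List.sorted_id_eq_sorted_id_iff_perm _ _).mpr
          have := (List.perm_append_right_iff [w]).mpr hperm
          simpa using this
        have h2 : (s :: (ext ++ [w])).getLastD 0 = w := by rw [hh, List.getLastD_concat]
        refine ⟨(PySem.List.sorted (s :: ext) (fun x => x) false, (s :: ext).getLastD 0),
          (ih _).mpr ⟨ext, hndp, hchp, by simpa using hlen, rfl⟩, w, hlast,
          fun hm => hwn (hperm.mem_iff.mp hm), ?_⟩
        rw [Prod.mk.injEq]
        exact ⟨h1.symm, h2⟩

-- A's answer is: some start in range(n) begins a cycle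
theorem pvA_iff (edges : List (Int × Int)) (n : Int) :
    (is_hamiltonian_cycle edges n = true ↔
      ∃ s : Int, (0 ≤ s ∧ s < n) ∧ pvHamFrom (pvAdjA edges) n s) := by
  unfold is_hamiltonian_cycle
  rw [List.any_eq_true]
  constructor
  · rintro ⟨s, hs, hbt⟩
    have hsr := PySem.List.mem_pyRange_one.mp hs
    have hbtc := (pvBacktrack_iff (pvAdjA edges) n n.toNat [s] (by simp) (by simp) (by simp)
      (by simp; omega) (by simp)).mp hbt
    refine ⟨s, hsr, ?_⟩
    obtain ⟨ext, hmain, hmem⟩ := hbtc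
    exact ⟨ext, by simpa using hmain, by simpa using hmem⟩
  · rintro ⟨s, hsr, ⟨ext, hmain, hmem⟩⟩
    refine ⟨s, PySem.List.mem_pyRange_one.mpr hsr, ?_⟩
    refine (pvBacktrack_iff (pvAdjA edges) n n.toNat [s] (by simp) (by simp) (by simp)
      (by simp; omega) (by simp)).mpr ?_
    exact ⟨ext, by simpa using hmain, by simpa using hmem⟩

-- a cycle of length n ≥ 2 starts at a key of the adjacency dict
theorem pvHamFrom_mem_keys (g : PySem.Dict Int (List Int)) (n : Int) (s : Int)
    (hn : 2 ≤ n) (h : pvHamFrom g n s) : s ∈ g.keys := by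
  obtain ⟨ext, ⟨hlen, -, hch⟩, -⟩ := h
  cases ext with
  | nil => simp at hlen; omega
  | cons b ext' =>
    by_contra hs
    have h0 : g.getD s [] = [] := by
      simp [PySem.Dict.getD, (PySem.Dict.get?_eq_none_iff_not_mem_keys g s).mpr hs]
    have hb : pvE g s b := (List.isChain_cons_cons.mp hch).1
    rw [pvE, h0] at hb
    simp at hb

-- B's answer for n ≥ 2
theorem pvB_iff (edges : List (Int × Int)) (n : Int) (hn : 2 ≤ n) :
    (is_hamiltonian_cycle_alt edges n = true ↔
      ∃ s : Int, s ∈ (pvAdjA edges).keys ∧ (0 ≤ s ∧ s < n) ∧ pvHamFrom (pvAdjA edges) n s) := by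
  unfold is_hamiltonian_cycle_alt
  rw [if_neg (by omega), if_neg (by omega), pvAdjB_eq, List.any_eq_true]
  constructor
  · rintro ⟨s, hkeys, hcond⟩
    by_cases hsr : 0 ≤ s ∧ s < n
    case neg =>
      rw [if_neg hsr] at hcond
      exact absurd hcond Bool.false_ne_true
    rw [if_pos hsr, List.any_eq_true] at hcond
    obtain ⟨st, hst, hcont⟩ := hcond
    obtain ⟨ext, hnd, hch, hlen, rfl⟩ := (pvLoop_mem _ s _ st).mp hst
    refine ⟨s, hkeys, hsr, ext, ⟨?_, hnd, hch⟩, ?_⟩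
    · simp only [List.length_cons]
      omega
    · simpa [List.contains_iff_mem] using hcont
  · rintro ⟨s, hkeys, hsr, ext, ⟨hlen, hnd, hch⟩, hmem⟩
    refine ⟨s, hkeys, ?_⟩
    rw [if_pos hsr, List.any_eq_true]
    refine ⟨(PySem.List.sorted (s :: ext) (fun x => x) false, (s :: ext).getLastD 0),
      (pvLoop_mem _ s _ _).mpr ⟨ext, hnd, hch, ?_, rfl⟩, ?_⟩
    · simp only [List.length_cons] at hlen
      omega
    · simpa [List.contains_iff_mem] using hmem

-- ===== VERDICT (by name: the statement is the Claim_ definition above) =====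
theorem is_hamiltonian_cycle_spec : Claim_equal_is_hamiltonian_cycle := by
  intro edges n _
  unfold Spec_is_hamiltonian_cycle
  by_cases h0 : n ≤ 0
  · have hA : is_hamiltonian_cycle edges n = false := by
      rw [Bool.eq_false_iff]
      intro h
      obtain ⟨s, ⟨h1, h2⟩, -⟩ := (pvA_iff edges n).mp h
      omega
    have hB : is_hamiltonian_cycle_alt edges n = false := by
      unfold is_hamiltonian_cycle_alt
      rw [if_pos h0]
    rw [hA, hB]
  · by_cases h1 : n = 1
    · subst h1
      have hr : PySem.List.pyRange 0 1 = [0] := by decide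
      have hA : is_hamiltonian_cycle edges 1 = ((pvAdjA edges).getD 0 []).contains 0 := by
        unfold is_hamiltonian_cycle
        rw [hr]
        simp only [List.any_cons, List.any_nil, Bool.or_false]
        show pvBacktrack _ 1 1 [0] = _
        rw [pvBacktrack]
        norm_num
      have hB : is_hamiltonian_cycle_alt edges 1 = ((pvAdjA edges).getD 0 []).contains 0 := by
        unfold is_hamiltonian_cycle_alt
        rw [if_neg (by omega), if_pos rfl, pvAdjB_eq]
      rw [hA, hB]
    · have hn2 : 2 ≤ n := by omega
      apply Bool.coe_iff_coe.mp
      rw [pvA_iff, pvB_iff edges n hn2]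
      constructor
      · rintro ⟨s, hs, hham⟩
        exact ⟨s, pvHamFrom_mem_keys _ n s hn2 hham, hs, hham⟩
      · rintro ⟨s, -, hs, hham⟩
        exact ⟨s, hs, hham⟩
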